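-- pv_equiv track=rewrite | github.com/pcismyname/SF210 | is_vowel.py | is_vowel
-- ===== SOURCE A (Python) =====
-- def is_vowel(word):
--     check = True
--     word = word.lower()
--     vowel = ['a','e','i','o','u']
--     for i in word:
--         if i >= 'a' and i <= 'z':
--             if i not in vowel:
--                 return False
--     return True
-- ===== SOURCE B (Python) =====
-- CONSONANTS = set('bcdfghjklmnpqrstvwxyz')
--
--
-- def is_vowel(word):
--     # "all letters are vowels" == "no ASCII consonant occurs"
--     return not (set(word.lower()) & CONSONANTS)
-- ===== Notes on version B (the rewrite author's own statement) =====
-- stated objective: idiomatic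
-- what changed: Reframes the all-letters-are-vowels check as disjointness from the 21 ASCII consonants: B lowercases once, builds the set of distinct characters and tests emptiness of its intersection with a fixed consonant set, instead of A running a char-by-char scan with an early return and a per-character vowel-list membership test.
import Mathlib
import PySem

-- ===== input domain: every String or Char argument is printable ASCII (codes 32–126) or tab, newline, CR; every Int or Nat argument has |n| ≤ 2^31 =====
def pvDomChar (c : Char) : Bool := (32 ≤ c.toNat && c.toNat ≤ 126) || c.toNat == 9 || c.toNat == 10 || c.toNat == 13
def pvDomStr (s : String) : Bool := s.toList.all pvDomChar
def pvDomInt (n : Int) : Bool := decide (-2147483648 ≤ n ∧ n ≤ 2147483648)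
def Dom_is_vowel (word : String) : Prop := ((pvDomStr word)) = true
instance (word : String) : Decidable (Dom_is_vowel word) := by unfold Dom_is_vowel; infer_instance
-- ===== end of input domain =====

-- B rephrases "all letters are vowels" as "the character set is disjoint from the 21 ASCII
-- consonants" (set intersection) instead of A's per-character scan with early return; idiomatic.

-- ===== PORT A =====
-- A's for-loop over the lowered word with its early 'return False'
def isVowelLoopA : List Char → Bool
  | [] => true
  | i :: rest =>
    if 'a' ≤ i && i ≤ 'z' then
      if !(['a', 'e', 'i', 'o', 'u'].contains i) then false
      else isVowelLoopA rest
    else isVowelLoopA rest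

def is_vowel (word : String) : Bool :=
  isVowelLoopA (PySem.Str.lower word).toList

-- ===== PORT B =====
-- CONSONANTS = set('bcdfghjklmnpqrstvwxyz')
def CONSONANTS : PySem.Set Char :=
  PySem.Set.ofList ['b','c','d','f','g','h','j','k','l','m','n','p','q','r','s','t','v','w','x','y','z']

-- not (set(word.lower()) & CONSONANTS)
def is_vowel_alt (word : String) : Bool :=
  (PySem.Set.inter (PySem.Set.ofList (PySem.Str.lower word).toList) CONSONANTS).isEmpty

-- ===== PRECONDITION & SPEC =====
def Spec_is_vowel (word : String) (out : Bool) : Prop := out = is_vowel_alt word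
instance (word : String) (out : Bool) : Decidable (Spec_is_vowel word out) := by unfold Spec_is_vowel; infer_instance

-- ===== CLAIM (what is proved, stated in full; the proofs are below) =====
def Claim_equal_is_vowel : Prop := ∀ (word : String), Dom_is_vowel word → Spec_is_vowel word (is_vowel word)

-- ===== LEMMAS AND PROOFS =====

-- a character is a consonant iff it is in 'a'..'z' and not a vowel
theorem char_consonant (c : Char) :
    (('a' ≤ c && c ≤ 'z') && !(['a', 'e', 'i', 'o', 'u'].contains c)) = CONSONANTS.contains c := by
  have h : CONSONANTS
      = ['b','c','d','f','g','h','j','k','l','m','n','p','q','r','s','t','v','w','x','y','z'] := by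
    decide
  rw [Bool.eq_iff_iff]
  simp [h, PySem.Set.contains, Char.le_def, Char.ext_iff, List.contains_eq_mem,
        UInt32.le_iff_toNat_le, UInt32.ext_iff]
  omega

-- A's early-return scan = "no character is a consonant"
theorem loopA_eq_all (l : List Char) :
    isVowelLoopA l = l.all (fun c => !CONSONANTS.contains c) := by
  induction l with
  | nil => rfl
  | cons c rest ih =>
    rw [List.all_cons, ← char_consonant c, ← ih]
    by_cases h1 : ('a' ≤ c && c ≤ 'z') = true
    · by_cases h2 : (['a', 'e', 'i', 'o', 'u'].contains c) = true
      · simp [isVowelLoopA, h1, h2]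
      · simp [isVowelLoopA, h1, h2]
    · simp [isVowelLoopA, h1]

-- B's empty intersection = "no character is a consonant"
theorem interB_eq_all (l : List Char) :
    (PySem.Set.inter (PySem.Set.ofList l) CONSONANTS).isEmpty
      = l.all (fun c => !CONSONANTS.contains c) := by
  rw [Bool.eq_iff_iff]
  simp [PySem.Set.inter, List.isEmpty_iff, List.filter_eq_nil_iff, List.all_eq_true,
        PySem.Set.mem_ofList]

-- ===== VERDICT (by name: the statement is the Claim_ definition above) =====
theorem is_vowel_spec : Claim_equal_is_vowel := by
  intro word _
  unfold Spec_is_vowel is_vowel is_vowel_alt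
  rw [loopA_eq_all, interB_eq_all]
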